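-- pv_equiv track=rewrite | github.com/Gubeommo/Programmers | Level1/문자열내림차순으로배치하기/Py_Solution.py | solution
-- ===== SOURCE A (Python) =====
-- def solution(s):
--     text=""
--     low=[]
--     up=[]
--     for i in range(len(s)):
--         if 96< ord(s[i])<123:
--             low.append(s[i])
--         else:
--             up.append(s[i])
--     low.sort(reverse=True)
--     up.sort(reverse=True)
--     for j in up:
--         low.append(j)
--     for h in low:
--         text += h
--     return text
-- ===== SOURCE B (Python) =====
-- def solution(s):
--     counts = [0] * 256
--     for ch in s:
--         counts[ord(ch)] += 1
--     parts = []
--     for c in range(122, 96, -1):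
--         parts.append(chr(c) * counts[c])
--     for c in range(255, 122, -1):
--         parts.append(chr(c) * counts[c])
--     for c in range(96, -1, -1):
--         parts.append(chr(c) * counts[c])
--     return "".join(parts)
-- ===== Notes on version B (the rewrite author's own statement) =====
-- stated objective: faster
-- what changed: Replaced the two comparison sorts (sort lowercase descending, sort the rest descending, concatenate) by a single counting sort: one pass tallies the 256 character codes, then the output is emitted by walking the codes in descending order, lowercase band 122..97 first, then 255..123 and 96..0.
import Mathlib
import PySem

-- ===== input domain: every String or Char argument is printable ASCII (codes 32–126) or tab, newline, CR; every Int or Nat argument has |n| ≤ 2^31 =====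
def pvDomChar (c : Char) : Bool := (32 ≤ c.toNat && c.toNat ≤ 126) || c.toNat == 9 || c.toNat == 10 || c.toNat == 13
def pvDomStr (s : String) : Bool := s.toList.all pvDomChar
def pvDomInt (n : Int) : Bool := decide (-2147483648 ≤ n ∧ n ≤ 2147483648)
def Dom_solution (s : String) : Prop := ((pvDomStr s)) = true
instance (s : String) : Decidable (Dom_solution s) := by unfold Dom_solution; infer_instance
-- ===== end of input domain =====

-- B replaces A's two comparison sorts by a single counting sort over the 256 char codes,
-- emitted in descending code order, lowercase band first (objective: faster).

-- ===== PORT A =====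
def solution (s : String) : String :=
  let cs := s.toList
  let lu := (PySem.List.pyRange 0 (cs.length : Int) 1).foldl
    (fun (p : List Char × List Char) i =>
      let c := PySem.List.pyGetD cs i ' '
      if 96 < c.toNat ∧ c.toNat < 123 then (p.1 ++ [c], p.2) else (p.1, p.2 ++ [c]))
    ([], [])
  let low := PySem.List.sorted lu.1 (fun x => x) true
  let up := PySem.List.sorted lu.2 (fun x => x) true
  let low2 := up.foldl (fun acc j => acc ++ [j]) low
  String.ofList (low2.foldl (fun acc h => acc ++ [h]) [])

-- ===== PORT B =====
def solution_alt (s : String) : String :=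
  let counts := s.toList.foldl
    (fun cnt ch =>
      PySem.List.pySetD cnt (ch.toNat : Int) (PySem.List.pyGetD cnt (ch.toNat : Int) 0 + 1))
    (List.replicate 256 (0 : Int))
  let chunk := fun (c : Int) => PySem.List.pyRepeat [Char.ofNat c.toNat] (PySem.List.pyGetD counts c 0)
  let parts := (PySem.List.pyRange 122 96 (-1)).foldl (fun acc c => acc ++ [chunk c]) []
  let parts := (PySem.List.pyRange 255 122 (-1)).foldl (fun acc c => acc ++ [chunk c]) parts
  let parts := (PySem.List.pyRange 96 (-1) (-1)).foldl (fun acc c => acc ++ [chunk c]) parts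
  String.ofList (PySem.Chars.join [] parts)

-- ===== PRECONDITION & SPEC =====
def Spec_solution (s : String) (out : String) : Prop := out = solution_alt s
instance (s : String) (out : String) : Decidable (Spec_solution s out) := by unfold Spec_solution; infer_instance

-- ===== CLAIM (what is proved, stated in full; the proofs are below) =====
def Claim_equal_solution : Prop := ∀ (s : String), Dom_solution s → Spec_solution s (solution s)

-- ===== LEMMAS AND PROOFS =====

/-- number of characters of `cs` whose code point is `c` -/
def codeCnt (cs : List Char) (c : Nat) : Nat := cs.countP (fun ch => ch.toNat = c)

def isLow (c : Char) : Bool := decide (96 < c.toNat ∧ c.toNat < 123)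

/-- the descending counting-sort segment for codes in `(b, a]` -/
def desc (cs : List Char) (a b : Int) : List Char :=
  (PySem.List.pyRange a b (-1)).flatMap
    (fun c => List.replicate (codeCnt cs c.toNat) (Char.ofNat c.toNat))

theorem toNat_ofNat_of_le (n : Nat) (h : n ≤ 255) : (Char.ofNat n).toNat = n := by
  rw [Char.toNat_ofNat, if_pos]; exact Or.inl (by omega)

theorem desc_eq_nil (cs : List Char) (a b : Int) (h : a ≤ b) : desc cs a b = [] := by
  simp [desc, PySem.List.pyRange_neg_one_eq_nil h]

theorem desc_cons (cs : List Char) (a b : Int) (h : b < a) :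
    desc cs a b = List.replicate (codeCnt cs a.toNat) (Char.ofNat a.toNat) ++ desc cs (a-1) b := by
  rw [desc, PySem.List.pyRange_neg_one_cons h]; simp [desc]

-- A's partition loop produces (filter isLow, filter ¬isLow)
theorem partition_loop (cs : List Char) (a b : List Char) :
    cs.foldl
      (fun (p : List Char × List Char) c =>
        if 96 < c.toNat ∧ c.toNat < 123 then (p.1 ++ [c], p.2) else (p.1, p.2 ++ [c]))
      (a, b)
    = (a ++ cs.filter isLow, b ++ cs.filter (fun c => !isLow c)) := by
  induction cs generalizing a b with
  | nil => simp
  | cons c t ih =>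
    by_cases h : 96 < c.toNat ∧ c.toNat < 123 <;>
      · simp [List.foldl_cons, h, ih, isLow, List.filter_cons]

theorem join_nil_flatten (l : List (List Char)) : PySem.Chars.join [] l = l.flatten := by
  induction l with
  | nil => rfl
  | cons h t ih => cases t with
    | nil => simp [PySem.Chars.join, List.intercalate]
    | cons h2 t2 =>
      rw [PySem.Chars.join_cons_cons] at *
      simp [ih]

theorem counts_spec (cs : List Char) (hcs : ∀ ch ∈ cs, ch.toNat < 256) (cnt0 : List Int)
    (h0 : cnt0.length = 256) (c : Nat) :
    PySem.List.pyGetD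
      (cs.foldl (fun cnt ch =>
        PySem.List.pySetD cnt (ch.toNat : Int) (PySem.List.pyGetD cnt (ch.toNat : Int) 0 + 1)) cnt0)
      (c : Int) 0
    = PySem.List.pyGetD cnt0 (c : Int) 0 + (codeCnt cs c : Int) := by
  induction cs generalizing cnt0 with
  | nil => simp [codeCnt]
  | cons ch t ih =>
    rw [List.foldl_cons]
    rw [ih (fun x hx => hcs x (List.mem_cons_of_mem _ hx)) _
        (by rw [PySem.List.length_pySetD, h0]),
        PySem.List.pyGetD_pySetD_natCast cnt0 ch.toNat c _ _
        (by rw [h0]; exact hcs ch (List.mem_cons_self))]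
    have : codeCnt (ch :: t) c = (if ch.toNat = c then 1 else 0) + codeCnt t c := by
      simp [codeCnt, List.countP_cons]
      split
      · simp_all
        omega
      · simp_all
    rw [this]
    by_cases h : c = ch.toNat <;> simp [h] <;> omega

theorem mem_desc (cs : List Char) (b : Int) (hb : -1 ≤ b) :
    ∀ (n : Nat) (a : Int), (a - b).toNat = n → a ≤ 255 →
      ∀ x ∈ desc cs a b, b < (x.toNat : Int) ∧ (x.toNat : Int) ≤ a := by
  intro n
  induction n with
  | zero =>
    intro a hn ha x hx
    rw [desc_eq_nil cs a b (by omega)] at hx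
    simp at hx
  | succ m ih =>
    intro a hn ha x hx
    rw [desc_cons cs a b (by omega)] at hx
    rcases List.mem_append.mp hx with h | h
    · have hx2 := List.eq_of_mem_replicate h
      have h0a : (0:Int) ≤ a := by omega
      have : x.toNat = a.toNat := by rw [hx2, toNat_ofNat_of_le _ (by omega)]
      rw [this]
      omega
    · have := ih (a-1) (by omega) (by omega) x h
      omega

theorem pairwise_desc (cs : List Char) (b : Int) (hb : -1 ≤ b) :
    ∀ (n : Nat) (a : Int), (a - b).toNat = n → a ≤ 255 →
      (desc cs a b).Pairwise (fun p q : Char => q ≤ p) := by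
  intro n
  induction n with
  | zero =>
    intro a hn ha
    rw [desc_eq_nil cs a b (by omega)]
    exact List.Pairwise.nil
  | succ m ih =>
    intro a hn ha
    rw [desc_cons cs a b (by omega)]
    rw [List.pairwise_append]
    refine ⟨List.pairwise_replicate.mpr (Or.inr le_rfl), ih (a-1) (by omega) (by omega), ?_⟩
    intro x hx y hy
    have hx2 := List.eq_of_mem_replicate hx
    have hy2 := mem_desc cs b hb m (a-1) (by omega) (by omega) y hy
    show y.toNat ≤ x.toNat
    rw [hx2, toNat_ofNat_of_le _ (by omega)]
    omega

theorem count_desc (cs : List Char) (b : Int) (hb : -1 ≤ b) :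
    ∀ (n : Nat) (a : Int), (a - b).toNat = n → a ≤ 255 → ∀ x : Char,
      (desc cs a b).count x =
        if b < (x.toNat : Int) ∧ (x.toNat : Int) ≤ a then codeCnt cs x.toNat else 0 := by
  intro n
  induction n with
  | zero =>
    intro a hn ha x
    rw [desc_eq_nil cs a b (by omega)]
    rw [if_neg (by omega)]
    rfl
  | succ m ih =>
    intro a hn ha x
    rw [desc_cons cs a b (by omega), List.count_append,
        ih (a-1) (by omega) (by omega) x, List.count_replicate]
    simp only [beq_iff_eq]
    by_cases hxa : x = Char.ofNat a.toNat
    · have hxn : x.toNat = a.toNat := by rw [hxa, toNat_ofNat_of_le _ (by omega)]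
      rw [if_pos hxa.symm, if_neg (by omega), if_pos (by omega), hxn]
      omega
    · have hxn : (x.toNat : Int) ≠ a := by
        intro h
        apply hxa
        apply Char.ext
        apply UInt32.toNat_inj.mp
        show x.toNat = (Char.ofNat a.toNat).toNat
        rw [toNat_ofNat_of_le _ (by omega)]
        omega
      rw [if_neg (by intro h; exact hxa h.symm)]
      by_cases hcond : b < (x.toNat : Int) ∧ (x.toNat : Int) ≤ a - 1
      · rw [if_pos hcond, if_pos (by omega)]; try omega
      · rw [if_neg hcond, if_neg (by omega)]; try omega

theorem codeCnt_eq_count (cs : List Char) (x : Char) : codeCnt cs x.toNat = cs.count x := by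
  rw [codeCnt, List.count]
  apply List.countP_congr
  intro c _
  constructor
  · intro h
    have : c = x := Char.ext (by exact UInt32.toNat_inj.mp (by simpa using h))
    simp [this]
  · intro h; simp at h; simp [h]

theorem count_filter_char (x : Char) (l : List Char) (p : Char → Bool) :
    (l.filter p).count x = if p x then l.count x else 0 := by
  by_cases h : p x = true
  · rw [if_pos h]; exact List.count_filter (by simp [h])
  · rw [if_neg h]
    exact List.count_eq_zero.mpr
      (fun hm => h (List.mem_filter.mp hm).2)

theorem eq_of_perm_of_desc_sorted (l1 l2 : List Char) (hp : l1.Perm l2)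
    (h1 : l1.Pairwise (fun p q : Char => q ≤ p)) (h2 : l2.Pairwise (fun p q : Char => q ≤ p)) :
    l1 = l2 :=
  hp.eq_of_pairwise (fun _ _ _ _ hab hba => le_antisymm hba hab) h1 h2

theorem sorted_low_eq (cs : List Char) :
    PySem.List.sorted (cs.filter isLow) (fun x => x) true = desc cs 122 96 := by
  apply eq_of_perm_of_desc_sorted
  · refine (PySem.List.sorted_perm _ _ _).trans (List.perm_iff_count.mpr fun x => ?_)
    rw [count_filter_char, count_desc cs 96 (by omega) _ 122 rfl (by omega) x,
        codeCnt_eq_count]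
    simp only [isLow]
    split_ifs with h1 h2 <;>
      first
        | rfl
        | (exfalso
           simp only [decide_eq_true_eq] at h1
           omega)
  · exact PySem.List.sorted_pairwise_rev _ _
  · exact pairwise_desc cs 96 (by omega) _ 122 rfl (by omega)

theorem sorted_up_eq (cs : List Char) (hcs : ∀ ch ∈ cs, ch.toNat ≤ 126) :
    PySem.List.sorted (cs.filter (fun c => !isLow c)) (fun x => x) true
      = desc cs 255 122 ++ desc cs 96 (-1) := by
  apply eq_of_perm_of_desc_sorted
  · refine (PySem.List.sorted_perm _ _ _).trans (List.perm_iff_count.mpr fun x => ?_)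
    rw [count_filter_char, List.count_append,
        count_desc cs 122 (by omega) _ 255 rfl (by omega) x,
        count_desc cs (-1) (by omega) _ 96 rfl (by omega) x,
        codeCnt_eq_count]
    simp only [isLow]
    by_cases hbig : 255 < x.toNat
    · have hc0 : cs.count x = 0 :=
        List.count_eq_zero.mpr (fun hm => by have := hcs x hm; omega)
      rw [hc0]
      split_ifs <;> rfl
    · split_ifs with h1 h2 h3 <;>
        first
          | rfl
          | omega
          | (exfalso
             simp at h1
             omega)
  · exact PySem.List.sorted_pairwise_rev _ _
  · rw [List.pairwise_append]
    refine ⟨pairwise_desc cs 122 (by omega) _ 255 rfl (by omega),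
            pairwise_desc cs (-1) (by omega) _ 96 rfl (by omega), ?_⟩
    intro x hx y hy
    have h1 := mem_desc cs 122 (by omega) _ 255 rfl (by omega) x hx
    have h2 := mem_desc cs (-1) (by omega) _ 96 rfl (by omega) y hy
    show y.toNat ≤ x.toNat
    omega

theorem flatten_flatMap_singleton (g : Int → List Char) (r : List Int) :
    (List.flatMap (fun c => [g c]) r).flatten = List.flatMap g r := by
  induction r with
  | nil => rfl
  | cons h t ih => simp_all [List.flatMap_cons]

-- ===== VERDICT (by name: the statement is the Claim_ definition above) =====
theorem solution_spec : Claim_equal_solution := by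
  intro s hdom
  have hcs : ∀ ch ∈ s.toList, ch.toNat ≤ 126 := by
    intro ch hch
    have : pvDomChar ch = true := List.all_eq_true.mp hdom ch hch
    simp [pvDomChar] at this
    omega
  show solution s = solution_alt s
  -- A side
  rw [solution]
  simp only []
  rw [PySem.List.foldl_pyRange_zero_pyGetD' s.toList ' '
        (fun (p : List Char × List Char) c =>
          if 96 < c.toNat ∧ c.toNat < 123 then (p.1 ++ [c], p.2) else (p.1, p.2 ++ [c]))
        ([], [])]
  rw [partition_loop s.toList [] []]
  simp only [List.nil_append]
  rw [PySem.List.foldl_append_singleton, PySem.List.foldl_append_singleton, List.nil_append]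
  -- B side
  rw [solution_alt]
  simp only []
  rw [PySem.List.foldl_append_eq_flatMap, PySem.List.foldl_append_eq_flatMap,
      PySem.List.foldl_append_eq_flatMap]
  rw [join_nil_flatten]
  rw [List.nil_append, List.flatten_append, List.flatten_append,
      flatten_flatMap_singleton, flatten_flatMap_singleton, flatten_flatMap_singleton]
  have hcount : ∀ c : Int, 0 ≤ c → c ≤ 255 →
      PySem.List.pyGetD
        (s.toList.foldl (fun cnt ch =>
          PySem.List.pySetD cnt (ch.toNat : Int) (PySem.List.pyGetD cnt (ch.toNat : Int) 0 + 1))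
          (List.replicate 256 (0 : Int)))
        c 0 = (codeCnt s.toList c.toNat : Int) := by
    intro c hc0 hc255
    have h := counts_spec s.toList (fun ch hm => by have := hcs ch hm; omega)
      (List.replicate 256 (0 : Int)) (by rw [List.length_replicate]) c.toNat
    rw [Int.toNat_of_nonneg hc0] at h
    rw [h, ← Int.toNat_of_nonneg hc0, PySem.List.pyGetD_natCast]
    rw [List.getD, List.getElem?_replicate]
    split <;> simp
  have hpart : ∀ (a b : Int), -1 ≤ b → a ≤ 255 →
      List.flatMap
        (fun c => PySem.List.pyRepeat [Char.ofNat c.toNat]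
          (PySem.List.pyGetD
            (s.toList.foldl (fun cnt ch =>
              PySem.List.pySetD cnt (ch.toNat : Int) (PySem.List.pyGetD cnt (ch.toNat : Int) 0 + 1))
              (List.replicate 256 (0 : Int)))
            c 0))
        (PySem.List.pyRange a b (-1)) = desc s.toList a b := by
    intro a b hb ha
    apply List.flatMap_congr
    intro c hc
    have hmem := (PySem.List.mem_pyRange_neg_one).mp hc
    rw [PySem.List.pyRepeat_singleton, hcount c (by omega) (by omega), Int.toNat_natCast]
  rw [hpart 122 96 (by omega) (by omega), hpart 255 122 (by omega) (by omega),
      hpart 96 (-1) (by omega) (by omega)]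
  rw [sorted_low_eq s.toList, sorted_up_eq s.toList hcs, List.append_assoc]
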